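-- pv_equiv track=rewrite | github.com/rakytap/sequential-quantum-gate-decomposer | squander/decomposition/qgd_Wide_Circuit_Optimization.py | heavy_hexagonal_topology
-- ===== SOURCE A (Python) =====
-- def heavy_hexagonal_topology(rows, cols):
--     """
--     Finite heavy-hex patch.
--
--     rows, cols describe the underlying honeycomb 'brick-wall' patch.
--     The first rows*cols qubits are the original honeycomb vertices.
--     Every original edge gets one inserted degree-2 qubit.
--
--     Returns:
--         list[(u, v)]  undirected couplers
--     """
--
--     def vid(r, c):
--         """Linear index for honeycomb vertex at row ``r``, column ``c``."""
--         return r * cols + c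
--
--     # Underlying honeycomb / brick-wall edges
--     base_edges = []
--
--     for r in range(rows):
--         for c in range(cols):
--             # Vertical brick-wall edges
--             if r + 1 < rows:
--                 base_edges.append((vid(r, c), vid(r + 1, c)))
--
--             # Alternating horizontal edges
--             if c + 1 < cols and ((r + c) % 2 == 0):
--                 base_edges.append((vid(r, c), vid(r, c + 1)))
--
--     # Subdivide every honeycomb edge by inserting a qubit
--     next_id = rows * cols
--     heavy_edges = []
--
--     for u, v in base_edges:
--         w = next_id
--         next_id += 1
--         heavy_edges.append((u, w))
--         heavy_edges.append((w, v))
--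
--     return heavy_edges
-- ===== SOURCE B (Python) =====
-- def heavy_hexagonal_topology(rows, cols):
--     """Single flat pass over cell ids: emit each subdivided edge directly,
--     allocating inserted-qubit ids from a running counter (vertical before
--     horizontal per cell, matching the original numbering)."""
--     if rows <= 0 or cols <= 0:
--         return []
--     edges = []
--     next_id = rows * cols
--     for cell in range(rows * cols):
--         r, c = divmod(cell, cols)
--         if r + 1 < rows:
--             edges.append((cell, next_id))
--             edges.append((next_id, cell + cols))
--             next_id += 1
--         if c + 1 < cols and (r + c) % 2 == 0:
--             edges.append((cell, next_id))
--             edges.append((next_id, cell + 1))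
--             next_id += 1
--     return edges
-- ===== Notes on version B (the rewrite author's own statement) =====
-- stated objective: simpler
-- what changed: B replaces A's two-phase build (nested loops collecting base_edges, then a second subdivision loop with a counter) by a single flat pass over cell ids with divmod, emitting both halves of each subdivided edge directly from a running id counter.
import Mathlib
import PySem

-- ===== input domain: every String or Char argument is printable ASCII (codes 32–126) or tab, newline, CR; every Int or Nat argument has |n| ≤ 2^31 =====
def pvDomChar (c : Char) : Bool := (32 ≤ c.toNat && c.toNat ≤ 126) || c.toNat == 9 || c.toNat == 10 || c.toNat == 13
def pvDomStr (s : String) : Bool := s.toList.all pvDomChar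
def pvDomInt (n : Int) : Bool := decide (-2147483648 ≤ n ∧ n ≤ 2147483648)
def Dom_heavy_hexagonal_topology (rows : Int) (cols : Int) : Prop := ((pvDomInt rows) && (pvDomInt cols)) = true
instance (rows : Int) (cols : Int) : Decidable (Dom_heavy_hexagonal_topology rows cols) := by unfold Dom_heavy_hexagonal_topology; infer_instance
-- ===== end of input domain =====

-- B replaces A's build-then-subdivide two-phase construction by one flat pass over
-- cell ids that emits the subdivided couplers directly from a running id counter (simpler).

-- ===== PORT A =====
-- Literal port of A: nested loops collect base_edges, then a second loop
-- subdivides each base edge, allocating inserted-qubit ids from next_id.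
def heavy_hexagonal_topology (rows : Int) (cols : Int) : List (Int × Int) :=
  let base_edges : List (Int × Int) :=
    (PySem.List.pyRange 0 rows 1).foldl (fun acc r =>
      (PySem.List.pyRange 0 cols 1).foldl (fun acc2 c =>
        let acc3 := if r + 1 < rows then acc2 ++ [(r * cols + c, (r + 1) * cols + c)] else acc2
        if c + 1 < cols ∧ PySem.Int.mod (r + c) 2 = 0 then
          acc3 ++ [(r * cols + c, r * cols + (c + 1))]
        else acc3) acc) []
  let st := base_edges.foldl
    (fun (st : Int × List (Int × Int)) uv => (st.1 + 1, st.2 ++ [(uv.1, st.1), (st.1, uv.2)]))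
    (rows * cols, [])
  st.2

-- ===== PORT B =====
-- Literal port of B: one flat pass over cell ids, divmod recovers (r, c),
-- both halves of each subdivided edge are emitted directly from the counter.
def heavy_hexagonal_topology_alt (rows : Int) (cols : Int) : List (Int × Int) :=
  if rows ≤ 0 ∨ cols ≤ 0 then []
  else
    ((PySem.List.pyRange 0 (rows * cols) 1).foldl
      (fun (st : Int × List (Int × Int)) cell =>
        let r := PySem.Int.floordiv cell cols
        let c := PySem.Int.mod cell cols
        let st1 := if r + 1 < rows then (st.1 + 1, st.2 ++ [(cell, st.1), (st.1, cell + cols)]) else st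
        if c + 1 < cols ∧ PySem.Int.mod (r + c) 2 = 0 then
          (st1.1 + 1, st1.2 ++ [(cell, st1.1), (st1.1, cell + 1)])
        else st1)
      (rows * cols, [])).2

-- ===== PRECONDITION & SPEC =====
def Spec_heavy_hexagonal_topology (rows : Int) (cols : Int) (out : List (Int × Int)) : Prop := out = heavy_hexagonal_topology_alt rows cols
instance (rows : Int) (cols : Int) (out : List (Int × Int)) : Decidable (Spec_heavy_hexagonal_topology rows cols out) := by unfold Spec_heavy_hexagonal_topology; infer_instance

-- ===== CLAIM (what is proved, stated in full; the proofs are below) =====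
def Claim_equal_heavy_hexagonal_topology : Prop := ∀ (rows : Int) (cols : Int), Dom_heavy_hexagonal_topology rows cols → Spec_heavy_hexagonal_topology rows cols (heavy_hexagonal_topology rows cols)

-- ===== LEMMAS AND PROOFS =====

/-- The (0, 1 or 2) base edges A records for the honeycomb cell (r, c). -/
def cellE (rows cols r c : Int) : List (Int × Int) :=
  (if r + 1 < rows then [(r * cols + c, (r + 1) * cols + c)] else []) ++
  (if c + 1 < cols ∧ PySem.Int.mod (r + c) 2 = 0 then [(r * cols + c, r * cols + (c + 1))] else [])

/-- A's subdivision step. -/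
def sd (st : Int × List (Int × Int)) (uv : Int × Int) : Int × List (Int × Int) :=
  (st.1 + 1, st.2 ++ [(uv.1, st.1), (st.1, uv.2)])

/-- B's per-cell step (named copy of the lambda in the port of B, for the proofs). -/
def stepB (rows cols : Int) (st : Int × List (Int × Int)) (cell : Int) : Int × List (Int × Int) :=
  let r := PySem.Int.floordiv cell cols
  let c := PySem.Int.mod cell cols
  let st1 := if r + 1 < rows then (st.1 + 1, st.2 ++ [(cell, st.1), (st.1, cell + cols)]) else st
  if c + 1 < cols ∧ PySem.Int.mod (r + c) 2 = 0 then
    (st1.1 + 1, st1.2 ++ [(cell, st1.1), (st1.1, cell + 1)])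
  else st1

lemma A_inner (rows cols r : Int) :
    ∀ (xs : List Int) (acc : List (Int × Int)),
      List.foldl (fun acc2 c =>
        let acc3 := if r + 1 < rows then acc2 ++ [(r * cols + c, (r + 1) * cols + c)] else acc2
        if c + 1 < cols ∧ PySem.Int.mod (r + c) 2 = 0 then
          acc3 ++ [(r * cols + c, r * cols + (c + 1))]
        else acc3) acc xs
      = acc ++ xs.flatMap (fun c => cellE rows cols r c) := by
  intro xs
  induction xs with
  | nil => intro acc; simp
  | cons c cs ih =>
    intro acc
    rw [List.foldl_cons, List.flatMap_cons, ih]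
    simp only [cellE]
    split_ifs <;> simp

lemma A_outer (rows cols : Int) :
    ∀ (rs : List Int) (acc : List (Int × Int)),
      List.foldl (fun acc r =>
        (PySem.List.pyRange 0 cols 1).foldl (fun acc2 c =>
          let acc3 := if r + 1 < rows then acc2 ++ [(r * cols + c, (r + 1) * cols + c)] else acc2
          if c + 1 < cols ∧ PySem.Int.mod (r + c) 2 = 0 then
            acc3 ++ [(r * cols + c, r * cols + (c + 1))]
          else acc3) acc) acc rs
      = acc ++ rs.flatMap (fun r => (PySem.List.pyRange 0 cols 1).flatMap (fun c => cellE rows cols r c)) := by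
  intro rs
  induction rs with
  | nil => intro acc; simp
  | cons r rest ih =>
    intro acc
    rw [List.foldl_cons, A_inner, ih, List.flatMap_cons, List.append_assoc]

/-- Characterization of A: subdivide the flat base-edge list. -/
lemma A_eq (rows cols : Int) :
    heavy_hexagonal_topology rows cols =
      (List.foldl sd (rows * cols, [])
        ((PySem.List.pyRange 0 rows 1).flatMap
          (fun r => (PySem.List.pyRange 0 cols 1).flatMap (fun c => cellE rows cols r c)))).2 := by
  simp only [heavy_hexagonal_topology, A_outer, List.nil_append]
  rfl

/-- B's per-cell step on cell id r*cols + c with 0 ≤ c < cols subdivides that cell's base edges. -/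
lemma cell_step (rows cols r c : Int) (hc : 0 < cols) (h0 : 0 ≤ c) (h1 : c < cols)
    (st : Int × List (Int × Int)) :
    stepB rows cols st (r * cols + c) = List.foldl sd st (cellE rows cols r c) := by
  have hdiv : PySem.Int.floordiv (r * cols + c) cols = r := by
    rw [PySem.Int.floordiv_eq_iff_of_pos hc]
    constructor <;> nlinarith
  have hmod : PySem.Int.mod (r * cols + c) cols = c := by
    rw [PySem.Int.mod_eq_emod_of_pos hc]
    rw [show r * cols + c = c + r * cols by ring, Int.add_mul_emod_self_right]
    exact Int.emod_eq_of_lt h0 h1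
  simp only [stepB, hdiv, hmod, cellE]
  split_ifs <;> simp [sd] <;> and_intros <;> ring

/-- Fold B's step over one row's worth of cell ids = subdivide that row's base edges. -/
lemma row_fold (rows cols r : Int) (hc : 0 < cols) :
    ∀ (cs : List Int), (∀ c ∈ cs, 0 ≤ c ∧ c < cols) → ∀ (st : Int × List (Int × Int)),
      List.foldl (stepB rows cols) st (cs.map (fun c => r * cols + c))
      = List.foldl sd st (cs.flatMap (fun c => cellE rows cols r c)) := by
  intro cs
  induction cs with
  | nil => intro _ st; simp
  | cons c rest ih =>
    intro hmem st
    have hb := hmem c (List.mem_cons_self)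
    rw [List.map_cons, List.foldl_cons, List.flatMap_cons, List.foldl_append,
      cell_step rows cols r c hc hb.1 hb.2 st]
    exact ih (fun x hx => hmem x (List.mem_cons_of_mem _ hx)) _

/-- Fold B's step over several rows of cell ids = subdivide the full base-edge list. -/
lemma rows_fold (rows cols : Int) (hc : 0 < cols) :
    ∀ (rs : List Int) (st : Int × List (Int × Int)),
      List.foldl (stepB rows cols) st
        (rs.flatMap (fun r => (PySem.List.pyRange 0 cols 1).map (fun c => r * cols + c)))
      = List.foldl sd st
        (rs.flatMap (fun r => (PySem.List.pyRange 0 cols 1).flatMap (fun c => cellE rows cols r c))) := by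
  intro rs
  induction rs with
  | nil => intro st; simp
  | cons r rest ih =>
    intro st
    rw [List.flatMap_cons, List.flatMap_cons, List.foldl_append, List.foldl_append,
      row_fold rows cols r hc _
        (fun c hcmem => by rw [PySem.List.mem_pyRange_one] at hcmem; exact hcmem)]
    exact ih _

/-- The flat cell-id range decomposes row by row (Nat row count). -/
lemma flat_cells_nat (cols : Int) (hc : 0 < cols) (R : Nat) :
    PySem.List.pyRange 0 ((R : Int) * cols) 1
      = (PySem.List.pyRange 0 (R : Int) 1).flatMap
          (fun r => (PySem.List.pyRange 0 cols 1).map (fun c => r * cols + c)) := by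
  induction R with
  | zero => simp [PySem.List.pyRange_one_eq_nil]
  | succ R ih =>
    have h1 : (0 : Int) ≤ (R : Int) * cols := by positivity
    have h2 : (R : Int) * cols ≤ ((R : Nat) + 1 : Int) * cols := by nlinarith [Int.natCast_nonneg R]
    have hsplit := PySem.List.pyRange_one_append 0 ((R : Int) * cols) (((R : Nat) + 1 : Int) * cols) h1 h2
    have hrows : PySem.List.pyRange 0 ((R : Int) + 1) 1
        = PySem.List.pyRange 0 (R : Int) 1 ++ [(R : Int)] :=
      PySem.List.pyRange_one_succ_right (Int.natCast_nonneg R)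
    have hlast : PySem.List.pyRange ((R : Int) * cols) (((R : Nat) + 1 : Int) * cols) 1
        = (PySem.List.pyRange 0 cols 1).map (fun c => (R : Int) * cols + c) := by
      rw [PySem.List.pyRange_one, PySem.List.pyRange_one]
      have : ((R : Nat) + 1 : Int) * cols - (R : Int) * cols = cols - 0 := by push_cast; ring
      rw [this, List.map_map]
      exact List.map_congr_left (fun k _ => by simp)
    push_cast at hsplit hrows hlast ⊢
    rw [hsplit, hrows, List.flatMap_append, ← ih, hlast]
    simp

/-- Int version of flat_cells_nat. -/
lemma flat_cells (rows cols : Int) (hr : 0 ≤ rows) (hc : 0 < cols) :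
    PySem.List.pyRange 0 (rows * cols) 1
      = (PySem.List.pyRange 0 rows 1).flatMap
          (fun r => (PySem.List.pyRange 0 cols 1).map (fun c => r * cols + c)) := by
  obtain ⟨R, rfl⟩ := Int.eq_ofNat_of_zero_le hr
  exact flat_cells_nat cols hc R

-- ===== VERDICT (by name: the statement is the Claim_ definition above) =====
theorem heavy_hexagonal_topology_spec : Claim_equal_heavy_hexagonal_topology := by
  intro rows cols _
  unfold Spec_heavy_hexagonal_topology
  rw [A_eq]
  by_cases hdeg : rows ≤ 0 ∨ cols ≤ 0
  · have hbase : (PySem.List.pyRange 0 rows 1).flatMap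
        (fun r => (PySem.List.pyRange 0 cols 1).flatMap (fun c => cellE rows cols r c)) = [] := by
      rcases hdeg with h | h
      · rw [PySem.List.pyRange_one_eq_nil h]; simp
      · rw [PySem.List.pyRange_one_eq_nil h]; simp
    rw [hbase]
    simp [heavy_hexagonal_topology_alt, hdeg]
  · have hr : 0 < rows := by omega
    have hc : 0 < cols := by omega
    unfold heavy_hexagonal_topology_alt
    rw [if_neg hdeg]
    have hstep : (fun (st : Int × List (Int × Int)) cell =>
        let r := PySem.Int.floordiv cell cols
        let c := PySem.Int.mod cell cols
        let st1 := if r + 1 < rows then (st.1 + 1, st.2 ++ [(cell, st.1), (st.1, cell + cols)]) else st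
        if c + 1 < cols ∧ PySem.Int.mod (r + c) 2 = 0 then
          (st1.1 + 1, st1.2 ++ [(cell, st1.1), (st1.1, cell + 1)])
        else st1) = stepB rows cols := rfl
    rw [hstep, flat_cells rows cols hr.le hc, rows_fold rows cols hc]
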